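-- pv_equiv track=rewrite | github.com/Maiiialen/Task-scheduling-algorithms | fsp.py | Bound2
-- ===== SOURCE A (Python) =====
-- import copy
-- import math
--
-- def calculate_C(zad):
--     S = []
--     C = []
--     Szad = []
--     Czad = []
--
--     Szad.append(0)
--     Czad.append(zad[0][0])
--
--     for i in range(0, len(zad)):
--         for j in range(0, len(zad[i])-1):
--             if i == 0 and j != 0:
--                 Szad.append(Czad[j-1])
--                 Czad.append(Szad[j] + zad[i][j])
--             elif i != 0:
--                 if j == 0:
--                     Szad.append(C[i-1][0])
--                     Czad.append(Szad[0] + zad[i][0])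
--                 else:
--                     Szad.append(max(Czad[j-1], C[i-1][j]))
--                     Czad.append(Szad[j] + zad[i][j])
--
--         S.append(Szad.copy())
--         C.append(Czad.copy())
--         Szad.clear()
--         Czad.clear()
--
--     return C
--
-- def Bound2(pi, zad, zadania):
--     LBmax = 0
--     LB = 0
--     x = len(pi)-1
--     C = calculate_C(copy.deepcopy(pi))
--     for i in range(0, len(zad[0])-1):
--         LB = C[x][i] + sumaP(copy.deepcopy(zad), i) + sumaMinP(copy.deepcopy(zadania), i)
--         if LB > LBmax:
--             LBmax = LB
--     return LBmax
--
-- def sumaP(zad, i):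
--     suma = 0
--     for j in zad:
--         suma += j[i]
--     return suma
--
-- def sumaMinP(zad, i):
--     suma = 0
--     m = len(zad[0])-1
--     for k in range(i+1, m):
--         minP = math.inf
--         for j in zad:
--             p = j[k]
--             if p < minP:
--                 minP = p
--         suma += minP
--     return suma
-- ===== SOURCE B (Python) =====
-- def Bound2(pi, zad, zadania):
--     # One pass per matrix: rolling DP row for the completion times (only the
--     # last row of C is ever read), column sums of zad, and a suffix-sum array
--     # of the column minima of zadania, instead of recomputing them per machine.
--     m = len(zad[0]) - 1
--     cur = []
--     acc = 0
--     for t in pi[0][:m]: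
--         acc += t
--         cur.append(acc)
--     for row in pi[1:]:
--         prev = cur
--         c = prev[0] + row[0]
--         cur = [c]
--         for p, t in zip(prev[1:], row[1:m]):
--             c = max(c, p) + t
--             cur.append(c)
--     colsum = [sum(row[i] for row in zad) for i in range(m)]
--     mz = len(zadania[0]) - 1
--     mins = [min(row[k] for row in zadania) for k in range(mz)]
--     rsuff = [0]
--     for v in reversed(mins):
--         rsuff.append(v + rsuff[-1])
--     suff = rsuff[::-1]
--     best = 0
--     for c, s, f in zip(cur, colsum, suff[1:]):
--         lb = c + s + f
--         if lb > best:
--             best = lb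
--     return best
-- ===== Notes on version B (the rewrite author's own statement) =====
-- stated objective: faster
-- what changed: B keeps only a rolling last DP row and precomputes column sums of zad plus a suffix-sum array of per-column minima of zadania once, instead of building the whole C table and rescanning all of zad and zadania (with deepcopies) for every machine index.
-- outside the precondition, e.g. on Bound2([[1, 2, 3]], [[1, 2, 3]], [[5, 6]]): A returns 5, B returns 2
import Mathlib
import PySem

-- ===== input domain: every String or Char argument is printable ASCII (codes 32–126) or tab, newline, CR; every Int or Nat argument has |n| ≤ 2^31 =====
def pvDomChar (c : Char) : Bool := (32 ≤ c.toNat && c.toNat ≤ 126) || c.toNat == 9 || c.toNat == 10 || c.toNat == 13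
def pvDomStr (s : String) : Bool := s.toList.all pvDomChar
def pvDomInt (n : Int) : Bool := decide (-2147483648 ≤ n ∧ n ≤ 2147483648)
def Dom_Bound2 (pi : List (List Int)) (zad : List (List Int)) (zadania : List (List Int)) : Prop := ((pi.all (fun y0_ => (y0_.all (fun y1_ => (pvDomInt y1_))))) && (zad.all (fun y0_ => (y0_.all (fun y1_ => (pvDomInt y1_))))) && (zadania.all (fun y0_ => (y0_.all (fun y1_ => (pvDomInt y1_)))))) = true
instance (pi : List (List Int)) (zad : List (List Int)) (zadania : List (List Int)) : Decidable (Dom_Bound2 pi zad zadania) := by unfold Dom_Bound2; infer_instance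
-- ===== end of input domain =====

-- B computes the same flow-shop lower bound in one pass per matrix (a rolling last
-- DP row, column sums and a suffix-sum array of column minima) instead of A's
-- full C table and per-machine rescans of zad and zadania.

-- ===== PORT A =====
-- the body of calculate_C's inner j-loop, named so the row invariants can speak about it
def pvInnerA (C : List (List Int)) (row : List Int) (i : Int)
    (p : List Int × List Int) (j : Int) : List Int × List Int :=
  if i = 0 ∧ j ≠ 0 then
    let Szad := p.1 ++ [PySem.List.pyGetD p.2 (j - 1) 0]
    (Szad, p.2 ++ [PySem.List.pyGetD Szad j 0 + PySem.List.pyGetD row j 0])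
  else if i ≠ 0 then
    if j = 0 then
      let Szad := p.1 ++ [PySem.List.pyGetD (PySem.List.pyGetD C (i - 1) []) 0 0]
      (Szad, p.2 ++ [PySem.List.pyGetD Szad 0 0 + PySem.List.pyGetD row 0 0])
    else
      let Szad := p.1 ++ [max (PySem.List.pyGetD p.2 (j - 1) 0) (PySem.List.pyGetD (PySem.List.pyGetD C (i - 1) []) j 0)]
      (Szad, p.2 ++ [PySem.List.pyGetD Szad j 0 + PySem.List.pyGetD row j 0])
  else p

-- the body of calculate_C's outer i-loop
def pvOuterA (zad : List (List Int))
    (st : List (List Int) × List (List Int) × List Int × List Int) (i : Int) :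
    List (List Int) × List (List Int) × List Int × List Int :=
  let row := PySem.List.pyGetD zad i []
  let inner := (PySem.List.pyRange 0 ((row.length : Int) - 1) 1).foldl
    (pvInnerA st.2.1 row i) (st.2.2.1, st.2.2.2)
  (st.1 ++ [inner.1], st.2.1 ++ [inner.2], ([] : List Int), ([] : List Int))

def pvCalcC (zad : List (List Int)) : List (List Int) :=
  ((PySem.List.pyRange 0 (zad.length : Int) 1).foldl (pvOuterA zad)
    ([], [], [0], [PySem.List.pyGetD (PySem.List.pyGetD zad 0 []) 0 0])).2.1

def pvSumaP (zad : List (List Int)) (i : Int) : Int :=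
  zad.foldl (fun suma j => suma + PySem.List.pyGetD j i 0) 0

def pvSumaMinP (zad : List (List Int)) (i : Int) : Int :=
  let m : Int := ((PySem.List.pyGetD zad 0 []).length : Int) - 1
  (PySem.List.pyRange (i + 1) m 1).foldl (fun suma k =>
    let minP := zad.foldl (fun (minP : Option Int) j =>
      let p := PySem.List.pyGetD j k 0
      match minP with
      | none => some p
      | some v => if p < v then some p else some v) none
    suma + minP.getD 0) 0

def Bound2 (pi : List (List Int)) (zad : List (List Int)) (zadania : List (List Int)) : Int :=
  let x : Int := (pi.length : Int) - 1
  let C := pvCalcC pi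
  (PySem.List.pyRange 0 (((PySem.List.pyGetD zad 0 []).length : Int) - 1) 1).foldl
    (fun LBmax i =>
      let LB := PySem.List.pyGetD (PySem.List.pyGetD C x []) i 0 + pvSumaP zad i + pvSumaMinP zadania i
      if LB > LBmax then LB else LBmax) 0

-- ===== PORT B =====
def Bound2_alt (pi : List (List Int)) (zad : List (List Int)) (zadania : List (List Int)) : Int :=
  let m : Int := ((PySem.List.pyGetD zad 0 []).length : Int) - 1
  let cur0 := ((PySem.List.slice (PySem.List.pyGetD pi 0 []) none (some m)).foldl
    (fun (p : List Int × Int) t => (p.1 ++ [p.2 + t], p.2 + t)) ([], 0)).1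
  let cur := (PySem.List.slice pi (some 1) none).foldl
    (fun prev row =>
      let c := PySem.List.pyGetD prev 0 0 + PySem.List.pyGetD row 0 0
      (((PySem.List.slice prev (some 1) none).zip (PySem.List.slice row (some 1) (some m))).foldl
        (fun (q : List Int × Int) pt => (q.1 ++ [max q.2 pt.1 + pt.2], max q.2 pt.1 + pt.2)) ([c], c)).1)
    cur0
  let colsum := (PySem.List.pyRange 0 m 1).map
    (fun i => (zad.map (fun row => PySem.List.pyGetD row i 0)).sum)
  let mz : Int := ((PySem.List.pyGetD zadania 0 []).length : Int) - 1
  let mins := (PySem.List.pyRange 0 mz 1).map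
    (fun k => (PySem.List.min? (zadania.map (fun row => PySem.List.pyGetD row k 0)) (fun v => v)).getD 0)
  let rsuff := mins.reverse.foldl (fun r v => r ++ [v + PySem.List.pyGetD r (-1) 0]) [0]
  let suff := (PySem.List.slice? rsuff none none (-1)).getD []
  (cur.zip (colsum.zip (PySem.List.slice suff (some 1) none))).foldl
    (fun best csf =>
      let lb := csf.1 + csf.2.1 + csf.2.2
      if lb > best then lb else best) 0

-- ===== PRECONDITION & SPEC =====
-- Pre_ is the natural flow-shop shape: all three matrices nonempty and either
-- zad's first row (which fixes the machine count m) has width ≥ 2 with pi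
-- rectangular and at least that wide, every zad row covering the m machines and
-- zadania's first row at least as wide as zad's with its rows covering zadania's
-- machine range — or the degenerate zero-machine shape (zad's first row of width
-- ≤ 1, a single nonempty pi row), on which both programs return 0.  It excludes
-- inputs on which A raises IndexError (empty/too-narrow rows) and narrower
-- pi/zadania inputs on which A may still return a value mixing the matrices'
-- incompatible machine ranges (see the cite in claim.json).
def Pre_Bound2 (pi : List (List Int)) (zad : List (List Int)) (zadania : List (List Int)) : Prop :=
  pi ≠ [] ∧ zad ≠ [] ∧ zadania ≠ [] ∧
  ((2 ≤ (zad.headD []).length ∧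
    ((zad.headD []).length ≤ (pi.headD []).length ∧
      ∀ r ∈ pi, r.length = (pi.headD []).length) ∧
    (∀ r ∈ zad, (zad.headD []).length - 1 ≤ r.length) ∧
    ((zad.headD []).length ≤ (zadania.headD []).length ∧
      ∀ r ∈ zadania, (zadania.headD []).length - 1 ≤ r.length)) ∨
   ((zad.headD []).length ≤ 1 ∧ pi.length = 1 ∧ pi.headD [] ≠ [] ∧
    ∀ r ∈ zadania, (zadania.headD []).length - 1 ≤ r.length))
instance (pi : List (List Int)) (zad : List (List Int)) (zadania : List (List Int)) : Decidable (Pre_Bound2 pi zad zadania) := by unfold Pre_Bound2; infer_instance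

def pvWitness_Bound2 : List (List Int) × List (List Int) × List (List Int) :=
  ([[1, 2], [3, 4]], [[1, 2], [3, 4]], [[1, 2], [3, 4]])

def Spec_Bound2 (pi : List (List Int)) (zad : List (List Int)) (zadania : List (List Int)) (out : Int) : Prop := out = Bound2_alt pi zad zadania
instance (pi : List (List Int)) (zad : List (List Int)) (zadania : List (List Int)) (out : Int) : Decidable (Spec_Bound2 pi zad zadania out) := by unfold Spec_Bound2; infer_instance

-- ===== CLAIM (what is proved, stated in full; the proofs are below) =====
def Claim_equal_Bound2 : Prop := ∀ (pi : List (List Int)) (zad : List (List Int)) (zadania : List (List Int)), Dom_Bound2 pi zad zadania → Pre_Bound2 pi zad zadania → Spec_Bound2 pi zad zadania (Bound2 pi zad zadania)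

-- ===== LEMMAS AND PROOFS =====

-- the shared mathematical shape of both row loops: an append-scan carrying its last element
def pvScanP (f : Int → Nat → Int) (c0 : Int) : Nat → List Int × Int
  | 0 => ([c0], c0)
  | j + 1 => let q := pvScanP f c0 j; (q.1 ++ [f q.2 (j + 1)], f q.2 (j + 1))

def pvRow0 (r : List Int) (m : Nat) : List Int :=
  (pvScanP (fun p k => p + r.getD k 0) (r.getD 0 0) (m - 1)).1

def pvNextRow (prev r : List Int) (m : Nat) : List Int :=
  (pvScanP (fun p k => max p (prev.getD k 0) + r.getD k 0) (prev.getD 0 0 + r.getD 0 0) (m - 1)).1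

def pvLastRow (z0 : List Int) (zs : List (List Int)) (m : Nat) : List Int :=
  zs.foldl (fun prev r => pvNextRow prev r m) (pvRow0 z0 m)

def pvSuffSum : List Int → List Int
  | [] => [0]
  | v :: t => (v + (pvSuffSum t).headD 0) :: pvSuffSum t

theorem pvScanP_len (f : Int → Nat → Int) (c0 : Int) (j : Nat) :
    (pvScanP f c0 j).1.length = j + 1 := by
  induction j with
  | zero => rfl
  | succ j ih => simp [pvScanP, ih]

theorem pvGetDSnoc {α : Type} [Inhabited α] (l : List α) (x d : α) :
    (l ++ [x]).getD l.length d = x := by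
  simp [List.getD]

theorem pvScanP_getD_last (f : Int → Nat → Int) (c0 : Int) (j : Nat) :
    (pvScanP f c0 j).1.getD j 0 = (pvScanP f c0 j).2 := by
  cases j with
  | zero => rfl
  | succ j =>
    have h := pvScanP_len f c0 j
    show ((pvScanP f c0 j).1 ++ [f (pvScanP f c0 j).2 (j + 1)]).getD (j + 1) 0 =
      f (pvScanP f c0 j).2 (j + 1)
    rw [← h, pvGetDSnoc]

theorem pvInnerA_zero_step (C : List (List Int)) (row : List Int) (p : List Int × List Int)
    (j : Int) (hj : j ≠ 0) :
    pvInnerA C row 0 p j = (p.1 ++ [PySem.List.pyGetD p.2 (j - 1) 0],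
      p.2 ++ [PySem.List.pyGetD (p.1 ++ [PySem.List.pyGetD p.2 (j - 1) 0]) j 0 + PySem.List.pyGetD row j 0]) := by
  simp [pvInnerA, hj]

theorem pvInnerA_zero (C : List (List Int)) (row : List Int) (j : Nat) :
    ((PySem.List.pyRange 0 ((j : Int) + 1) 1).foldl (pvInnerA C row 0) ([0], [row.getD 0 0])).1.length = j + 1 ∧
    ((PySem.List.pyRange 0 ((j : Int) + 1) 1).foldl (pvInnerA C row 0) ([0], [row.getD 0 0])).2 =
      (pvScanP (fun p k => p + row.getD k 0) (row.getD 0 0) j).1 := by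
  induction j with
  | zero =>
    have h1 : PySem.List.pyRange 0 ((0:Nat) + 1) 1 = [0] := by decide
    rw [h1]
    simp [pvInnerA, pvScanP]
  | succ j ih =>
    obtain ⟨ih1, ih2⟩ := ih
    have hb : (0:Int) ≤ (j:Int) + 1 := by omega
    have hr := PySem.List.pyRange_one_succ_right hb
    have hc : (((j+1:Nat)) : Int) = (j:Int) + 1 := by push_cast; ring
    rw [hc, hr, List.foldl_append]
    set st := (PySem.List.pyRange 0 ((j:Int)+1) 1).foldl (pvInnerA C row 0) ([0], [row.getD 0 0]) with hst
    simp only [List.foldl_cons, List.foldl_nil]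
    rw [pvInnerA_zero_step C row st ((j:Int)+1) (by omega)]
    have e1 : (j:Int) + 1 - 1 = ((j:Nat):Int) := by ring
    rw [e1]
    have e2 : PySem.List.pyGetD st.2 ((j:Nat):Int) 0 = (pvScanP (fun p k => p + row.getD k 0) (row.getD 0 0) j).2 := by
      rw [PySem.List.pyGetD_natCast, ih2, pvScanP_getD_last]
    have e3 : PySem.List.pyGetD (st.1 ++ [PySem.List.pyGetD st.2 ((j:Nat):Int) 0]) ((j:Int)+1) 0
        = (pvScanP (fun p k => p + row.getD k 0) (row.getD 0 0) j).2 := by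
      rw [← hc, PySem.List.pyGetD_natCast, ← ih1, pvGetDSnoc, e2]
    have e4 : PySem.List.pyGetD row ((j:Int)+1) 0 = row.getD (j+1) 0 := by
      rw [← hc, PySem.List.pyGetD_natCast]
    refine ⟨by simp [ih1], ?_⟩
    rw [e3, e4, ih2]
    rfl

theorem pvInnerA_pos_zero_step (C : List (List Int)) (row : List Int) (i : Int) (hi : i ≠ 0)
    (p : List Int × List Int) :
    pvInnerA C row i p 0 = (p.1 ++ [PySem.List.pyGetD (PySem.List.pyGetD C (i - 1) []) 0 0],
      p.2 ++ [PySem.List.pyGetD (p.1 ++ [PySem.List.pyGetD (PySem.List.pyGetD C (i - 1) []) 0 0]) 0 0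
        + PySem.List.pyGetD row 0 0]) := by
  simp [pvInnerA, hi]

theorem pvInnerA_pos_step (C : List (List Int)) (row : List Int) (i j : Int) (hi : i ≠ 0) (hj : j ≠ 0)
    (p : List Int × List Int) :
    pvInnerA C row i p j = (p.1 ++ [max (PySem.List.pyGetD p.2 (j - 1) 0) (PySem.List.pyGetD (PySem.List.pyGetD C (i - 1) []) j 0)],
      p.2 ++ [PySem.List.pyGetD (p.1 ++ [max (PySem.List.pyGetD p.2 (j - 1) 0) (PySem.List.pyGetD (PySem.List.pyGetD C (i - 1) []) j 0)]) j 0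
        + PySem.List.pyGetD row j 0]) := by
  simp [pvInnerA, hi, hj]

theorem pvInnerA_pos (C : List (List Int)) (row : List Int) (i : Int) (hi : i ≠ 0) (j : Nat) :
    ((PySem.List.pyRange 0 ((j : Int) + 1) 1).foldl (pvInnerA C row i) ([], [])).1.length = j + 1 ∧
    ((PySem.List.pyRange 0 ((j : Int) + 1) 1).foldl (pvInnerA C row i) ([], [])).2 =
      (pvScanP (fun p k => max p ((PySem.List.pyGetD C (i - 1) []).getD k 0) + row.getD k 0)
        ((PySem.List.pyGetD C (i - 1) []).getD 0 0 + row.getD 0 0) j).1 := by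
  induction j with
  | zero =>
    have h1 : PySem.List.pyRange 0 ((0:Nat) + 1) 1 = [0] := by decide
    rw [h1]
    simp only [List.foldl_cons, List.foldl_nil]
    rw [pvInnerA_pos_zero_step C row i hi]
    refine ⟨by simp, ?_⟩
    simp [pvScanP, PySem.List.pyGetD_zero]
  | succ j ih =>
    obtain ⟨ih1, ih2⟩ := ih
    have hb : (0:Int) ≤ (j:Int) + 1 := by omega
    have hr := PySem.List.pyRange_one_succ_right hb
    have hc : (((j+1:Nat)) : Int) = (j:Int) + 1 := by push_cast; ring
    rw [hc, hr, List.foldl_append]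
    set g := fun p k => max p ((PySem.List.pyGetD C (i - 1) []).getD k 0) + row.getD k 0 with hg
    set c0 := (PySem.List.pyGetD C (i - 1) []).getD 0 0 + row.getD 0 0 with hc0
    set st := (PySem.List.pyRange 0 ((j:Int)+1) 1).foldl (pvInnerA C row i) (([] : List Int), ([] : List Int)) with hst
    simp only [List.foldl_cons, List.foldl_nil]
    rw [pvInnerA_pos_step C row i ((j:Int)+1) hi (by omega)]
    have e1 : (j:Int) + 1 - 1 = ((j:Nat):Int) := by ring
    rw [e1]
    set w := max (PySem.List.pyGetD st.2 ((j:Nat):Int) 0) (PySem.List.pyGetD (PySem.List.pyGetD C (i - 1) []) ((j:Int)+1) 0) with hw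
    have e2 : PySem.List.pyGetD st.2 ((j:Nat):Int) 0 = (pvScanP g c0 j).2 := by
      rw [PySem.List.pyGetD_natCast, ih2, pvScanP_getD_last]
    have e3 : PySem.List.pyGetD (st.1 ++ [w]) ((j:Int)+1) 0 = w := by
      rw [← hc, PySem.List.pyGetD_natCast, ← ih1, pvGetDSnoc]
    have e4 : PySem.List.pyGetD row ((j:Int)+1) 0 = row.getD (j+1) 0 := by
      rw [← hc, PySem.List.pyGetD_natCast]
    have e5 : PySem.List.pyGetD (PySem.List.pyGetD C (i - 1) []) ((j:Int)+1) 0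
        = (PySem.List.pyGetD C (i - 1) []).getD (j+1) 0 := by
      rw [← hc, PySem.List.pyGetD_natCast]
    refine ⟨by simp [ih1], ?_⟩
    rw [e3, e4, ih2]
    show (pvScanP g c0 j).1 ++ [w + row.getD (j+1) 0] = (pvScanP g c0 (j+1)).1
    rw [hw, e2, e5]
    rfl

theorem pvCalcC_outer (z0 : List Int) (zs : List (List Int)) (L : Nat) (hL : 2 ≤ L)
    (hz0 : z0.length = L) (hzs : ∀ r ∈ zs, r.length = L) (k : Nat) (hk : k ≤ zs.length) :
    ((PySem.List.pyRange 0 ((k : Int) + 1) 1).foldl (pvOuterA (z0 :: zs))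
        ([], [], [0], [PySem.List.pyGetD (PySem.List.pyGetD (z0 :: zs) 0 []) 0 0])).2.1.length = k + 1 ∧
    ((PySem.List.pyRange 0 ((k : Int) + 1) 1).foldl (pvOuterA (z0 :: zs))
        ([], [], [0], [PySem.List.pyGetD (PySem.List.pyGetD (z0 :: zs) 0 []) 0 0])).2.1.getD k []
      = pvLastRow z0 (zs.take k) (L - 1) ∧
    ((PySem.List.pyRange 0 ((k : Int) + 1) 1).foldl (pvOuterA (z0 :: zs))
        ([], [], [0], [PySem.List.pyGetD (PySem.List.pyGetD (z0 :: zs) 0 []) 0 0])).2.2.1 = [] ∧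
    ((PySem.List.pyRange 0 ((k : Int) + 1) 1).foldl (pvOuterA (z0 :: zs))
        ([], [], [0], [PySem.List.pyGetD (PySem.List.pyGetD (z0 :: zs) 0 []) 0 0])).2.2.2 = [] := by
  induction k with
  | zero =>
    have h1 : PySem.List.pyRange 0 ((0:Nat) + 1) 1 = [0] := by decide
    rw [h1]
    simp only [List.foldl_cons, List.foldl_nil]
    rw [pvOuterA]
    have hrow : PySem.List.pyGetD (z0 :: zs) (0:Int) [] = z0 := by
      simp [PySem.List.pyGetD_zero]
    simp only [hrow]
    have hbnd : ((z0.length : Int) - 1) = ((L - 2 : Nat) : Int) + 1 := by omega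
    rw [hbnd]
    have hz := pvInnerA_zero ([] : List (List Int)) z0 (L - 2)
    have hget0 : PySem.List.pyGetD z0 (0:Int) 0 = z0.getD 0 0 := PySem.List.pyGetD_zero z0 0
    rw [hget0]
    refine ⟨by simp, ?_, trivial, trivial⟩
    simp only [List.take_zero, pvLastRow, List.foldl_nil, pvRow0]
    have hm : L - 1 - 1 = L - 2 := by omega
    rw [hm]
    simpa using hz.2
  | succ k ih =>
    have hk' : k ≤ zs.length := by omega
    obtain ⟨ih1, ih2, ih3, ih4⟩ := ih hk'
    have hb : (0:Int) ≤ (k:Int) + 1 := by omega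
    have hc : (((k+1:Nat)) : Int) = (k:Int) + 1 := by push_cast; ring
    rw [hc, PySem.List.pyRange_one_succ_right hb, List.foldl_append]
    set st := (PySem.List.pyRange 0 ((k:Int)+1) 1).foldl (pvOuterA (z0 :: zs))
      ([], [], [0], [PySem.List.pyGetD (PySem.List.pyGetD (z0 :: zs) 0 []) 0 0]) with hst
    simp only [List.foldl_cons, List.foldl_nil]
    rw [pvOuterA]
    have hkl : k < zs.length := by omega
    have hrow : PySem.List.pyGetD (z0 :: zs) ((k:Int)+1) [] = zs[k] := by
      rw [← hc, PySem.List.pyGetD_natCast]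
      simp [List.getD, List.getElem?_eq_getElem hkl]
    simp only [hrow, ih3, ih4]
    have hrl : zs[k].length = L := hzs _ (List.getElem_mem hkl)
    have hbnd : ((zs[k].length : Int) - 1) = ((L - 2 : Nat) : Int) + 1 := by
      rw [hrl]; omega
    rw [hbnd]
    have hp := pvInnerA_pos st.2.1 zs[k] ((k:Int)+1) (by omega) (L - 2)
    have hprev : PySem.List.pyGetD st.2.1 ((k:Int) + 1 - 1) [] = pvLastRow z0 (zs.take k) (L-1) := by
      have : (k:Int) + 1 - 1 = ((k:Nat):Int) := by ring
      rw [this, PySem.List.pyGetD_natCast, ih2]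
    rw [hprev] at hp
    refine ⟨by simp [ih1], ?_, trivial, trivial⟩
    have hlast : (st.2.1 ++ [((PySem.List.pyRange 0 (((L - 2:Nat):Int) + 1) 1).foldl
        (pvInnerA st.2.1 zs[k] ((k:Int)+1)) ([], [])).2]).getD (k+1) [] =
        ((PySem.List.pyRange 0 (((L - 2:Nat):Int) + 1) 1).foldl
        (pvInnerA st.2.1 zs[k] ((k:Int)+1)) ([], [])).2 := by
      rw [← ih1, pvGetDSnoc]
    rw [hlast, hp.2]
    have htk : zs.take (k+1) = zs.take k ++ [zs[k]] := by
      rw [List.take_add_one]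
      simp [List.getElem?_eq_getElem hkl]
    rw [htk]
    have hstep : pvLastRow z0 (zs.take k ++ [zs[k]]) (L-1)
        = pvNextRow (pvLastRow z0 (zs.take k) (L-1)) zs[k] (L-1) := by
      rw [pvLastRow, List.foldl_append]
      simp only [List.foldl_cons, List.foldl_nil]
      rfl
    rw [hstep, pvNextRow]
    have hm : L - 1 - 1 = L - 2 := by omega
    rw [hm]

theorem pvB_row0 (r : List Int) (j : Nat) (hj : j < r.length) :
    (r.take (j+1)).foldl (fun (p : List Int × Int) t => (p.1 ++ [p.2 + t], p.2 + t)) ([], 0)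
      = pvScanP (fun p k => p + r.getD k 0) (r.getD 0 0) j := by
  induction j with
  | zero =>
    cases r with
    | nil => simp at hj
    | cons a t => simp [pvScanP, List.getD]
  | succ j ih =>
    have hj' : j < r.length := by omega
    rw [List.take_add_one, List.getElem?_eq_getElem hj, List.foldl_append, ih hj']
    simp only [Option.toList_some, List.foldl_cons, List.foldl_nil]
    simp [pvScanP, List.getD, List.getElem?_eq_getElem hj]

theorem pvZip_next (prev r : List Int) (m : Nat) (hm : 1 ≤ m)
    (hp : prev.length = m) (hr : m + 1 ≤ r.length) (c : Int)
    (hc : c = prev.getD 0 0 + r.getD 0 0) (j : Nat) (hj : j ≤ m - 1) :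
    (((prev.tail.zip ((r.drop 1).take (m-1))).take j).foldl
        (fun (q : List Int × Int) pt => (q.1 ++ [max q.2 pt.1 + pt.2], max q.2 pt.1 + pt.2)) ([c], c))
      = pvScanP (fun p k => max p (prev.getD k 0) + r.getD k 0) (prev.getD 0 0 + r.getD 0 0) j := by
  induction j with
  | zero => simp [pvScanP, hc]
  | succ j ih =>
    have hlen : (prev.tail.zip ((r.drop 1).take (m-1))).length = m - 1 := by
      simp [List.length_zip, hp]
      omega
    have hjl : j < (prev.tail.zip ((r.drop 1).take (m-1))).length := by omega
    rw [List.take_add_one, List.getElem?_eq_getElem hjl, List.foldl_append, ih (by omega)]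
    simp only [Option.toList_some, List.foldl_cons, List.foldl_nil]
    have h1 : j < prev.tail.length := by simp [hp]; omega
    have h2 : j < ((r.drop 1).take (m-1)).length := by simp; omega
    have hz : (prev.tail.zip ((r.drop 1).take (m-1)))[j] = (prev.tail[j], ((r.drop 1).take (m-1))[j]) :=
      List.getElem_zip
    have hpv : prev.tail[j] = prev.getD (j+1) 0 := by
      rw [List.getElem_tail]
      simp [List.getD, List.getElem?_eq_getElem (show j + 1 < prev.length by omega)]
    have hrv : ((r.drop 1).take (m-1))[j] = r.getD (j+1) 0 := by
      rw [List.getElem_take, List.getElem_drop]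
      simp [List.getD, List.getElem?_eq_getElem (show j + 1 < r.length by omega)]
      congr 1
      omega
    rw [hz, hpv, hrv]
    rfl

theorem pvNextRow_len (prev r : List Int) (m : Nat) (hm : 1 ≤ m) :
    (pvNextRow prev r m).length = m := by
  rw [pvNextRow, pvScanP_len]; omega

theorem pvRow0_len (r : List Int) (m : Nat) (hm : 1 ≤ m) :
    (pvRow0 r m).length = m := by
  rw [pvRow0, pvScanP_len]; omega

theorem pvFoldNext_len (m : Nat) (hm : 1 ≤ m) (zs : List (List Int)) :
    ∀ prev : List Int, prev.length = m →
      (zs.foldl (fun p r => pvNextRow p r m) prev).length = m := by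
  induction zs with
  | nil => intro prev hp; simpa using hp
  | cons a t ih =>
    intro prev hp
    simp only [List.foldl_cons]
    exact ih _ (pvNextRow_len _ _ _ hm)

theorem pvLastRow_len (z0 : List Int) (zs : List (List Int)) (m : Nat) (hm : 1 ≤ m) :
    (pvLastRow z0 zs m).length = m :=
  pvFoldNext_len m hm zs _ (pvRow0_len z0 m hm)

-- B's per-row loop equals pvNextRow on well-shaped rows
theorem pvB_rows (m : Nat) (hm : 1 ≤ m) (zs : List (List Int)) :
    ∀ prev : List Int, prev.length = m → (∀ r ∈ zs, m + 1 ≤ r.length) →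
      zs.foldl (fun prev row =>
        (((PySem.List.slice prev (some 1) none).zip (PySem.List.slice row (some 1) (some ((m:Nat):Int)))).foldl
          (fun (q : List Int × Int) pt => (q.1 ++ [max q.2 pt.1 + pt.2], max q.2 pt.1 + pt.2))
          ([PySem.List.pyGetD prev 0 0 + PySem.List.pyGetD row 0 0],
            PySem.List.pyGetD prev 0 0 + PySem.List.pyGetD row 0 0)).1) prev
      = zs.foldl (fun p r => pvNextRow p r m) prev := by
  induction zs with
  | nil => intro prev _ _; rfl
  | cons a t ih =>
    intro prev hp hall
    simp only [List.foldl_cons]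
    have ha : m + 1 ≤ a.length := hall a (by simp)
    have hstep : (((PySem.List.slice prev (some 1) none).zip (PySem.List.slice a (some 1) (some ((m:Nat):Int)))).foldl
          (fun (q : List Int × Int) pt => (q.1 ++ [max q.2 pt.1 + pt.2], max q.2 pt.1 + pt.2))
          ([PySem.List.pyGetD prev 0 0 + PySem.List.pyGetD a 0 0],
            PySem.List.pyGetD prev 0 0 + PySem.List.pyGetD a 0 0)).1 = pvNextRow prev a m := by
      have hs1 : PySem.List.slice prev (some 1) none = prev.tail := PySem.List.slice_from_one prev
      have hs2 : PySem.List.slice a (some 1) (some ((m:Nat):Int)) = (a.drop 1).take (m - 1) := by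
        have h1 : ((1:Nat):Int) = (1:Int) := by norm_num
        rw [← h1, PySem.List.slice_natCast]
      have hzl : (prev.tail.zip ((a.drop 1).take (m-1))).length = m - 1 := by
        simp [List.length_zip, hp]
        omega
      have hfull := pvZip_next prev a m hm hp ha
        (PySem.List.pyGetD prev 0 0 + PySem.List.pyGetD a 0 0)
        (by rw [PySem.List.pyGetD_zero, PySem.List.pyGetD_zero]) (m-1) (le_refl _)
      rw [List.take_of_length_le (by omega)] at hfull
      rw [hs1, hs2, hfull]
      rfl
    rw [hstep]
    exact ih _ (pvNextRow_len _ _ _ hm) (fun r hr => hall r (by simp [hr]))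

theorem pvMinFold_aux (f : List Int → Int) (t : List (List Int)) :
    ∀ v : Int, t.foldl (fun (minP : Option Int) j =>
        match minP with
        | none => some (f j)
        | some w => if f j < w then some (f j) else some w) (some v)
      = some ((t.map f).foldl min v) := by
  induction t with
  | nil => intro v; rfl
  | cons a s ih =>
    intro v
    simp only [List.foldl_cons, List.map_cons]
    have hmin : (if f a < v then some (f a) else some v) = some (min v (f a)) := by
      by_cases h : f a < v
      · rw [if_pos h, min_eq_right (le_of_lt h)]
      · rw [if_neg h, min_eq_left (by omega)]
    rw [hmin, ih]

theorem pvMinFold (f : List Int → Int) (l : List (List Int)) (hl : l ≠ []) :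
    l.foldl (fun (minP : Option Int) j =>
        match minP with
        | none => some (f j)
        | some w => if f j < w then some (f j) else some w) none
      = some ((PySem.List.min? (l.map f) (fun v => v)).getD 0) := by
  cases l with
  | nil => exact absurd rfl hl
  | cons a t =>
    simp only [List.foldl_cons, List.map_cons]
    rw [pvMinFold_aux, PySem.List.min?_id_cons]
    simp

theorem pvSuffSum_ne_nil (ms : List Int) : pvSuffSum ms ≠ [] := by
  cases ms <;> simp [pvSuffSum]

theorem pvSuffSum_len (ms : List Int) : (pvSuffSum ms).length = ms.length + 1 := by
  induction ms with
  | nil => rfl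
  | cons v t ih => simp [pvSuffSum, ih]

theorem pvSuffSum_head (ms : List Int) : (pvSuffSum ms).headD 0 = ms.sum := by
  induction ms with
  | nil => rfl
  | cons v t ih => simp only [pvSuffSum, List.headD_cons, List.sum_cons, ih]

theorem pvSuffSum_getD (ms : List Int) : ∀ u : Nat, u ≤ ms.length →
    (pvSuffSum ms).getD u 0 = (ms.drop u).sum := by
  induction ms with
  | nil =>
    intro u hu
    simp at hu
    subst hu; rfl
  | cons v t ih =>
    intro u hu
    cases u with
    | zero =>
      have := pvSuffSum_head (v :: t)
      simpa [pvSuffSum, List.getD] using pvSuffSum_head (v :: t)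
    | succ u =>
      simp only [pvSuffSum, List.getD_cons_succ, List.drop_succ_cons]
      exact ih u (by simpa using hu)

theorem pvGetD_neg_one_reverse (l : List Int) (h : l ≠ []) :
    PySem.List.pyGetD l.reverse (-1) 0 = l.headD 0 := by
  cases l with
  | nil => exact absurd rfl h
  | cons a t =>
    rw [List.reverse_cons, PySem.List.pyGetD_neg_one_append_singleton]
    rfl

theorem pvRsuff (ms : List Int) :
    ms.reverse.foldl (fun r v => r ++ [v + PySem.List.pyGetD r (-1) 0]) [0]
      = (pvSuffSum ms).reverse := by
  induction ms with
  | nil => rfl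
  | cons v t ih =>
    rw [List.reverse_cons, List.foldl_append, ih]
    simp only [List.foldl_cons, List.foldl_nil]
    rw [pvGetD_neg_one_reverse _ (pvSuffSum_ne_nil t)]
    rw [show (pvSuffSum t).reverse ++ [v + (pvSuffSum t).headD 0]
        = ((v + (pvSuffSum t).headD 0) :: pvSuffSum t).reverse from by simp]
    show ((v + (pvSuffSum t).headD 0) :: pvSuffSum t).reverse = (pvSuffSum (v :: t)).reverse
    rfl

theorem pvRange_drop (a : Nat) (b : Int) (_hb : 0 ≤ b) :
    (PySem.List.pyRange 0 b 1).drop a = PySem.List.pyRange (a : Int) b 1 := by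
  rw [PySem.List.pyRange_one 0 b, PySem.List.pyRange_one (a:Int) b]
  apply List.ext_getElem
  · simp
  · intro u h1 h2
    simp only [List.getElem_drop, List.getElem_map, List.getElem_range]
    push_cast
    try ring

theorem pvScanP_getD_prefix (f : Int → Nat → Int) (c0 : Int) :
    ∀ j k : Nat, k ≤ j → (pvScanP f c0 j).1.getD k 0 = (pvScanP f c0 k).2 := by
  intro j
  induction j with
  | zero =>
    intro k hk
    have : k = 0 := by omega
    subst this; rfl
  | succ j ih =>
    intro k hk
    by_cases hkj : k ≤ j
    · show ((pvScanP f c0 j).1 ++ [f (pvScanP f c0 j).2 (j + 1)]).getD k 0 = _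
      rw [List.getD_append _ _ _ _ (by rw [pvScanP_len]; omega)]
      exact ih k hkj
    · have : k = j + 1 := by omega
      subst this
      exact pvScanP_getD_last f c0 (j + 1)

theorem pvScanP_snd_congr (f g : Int → Nat → Int) (c0 : Int) :
    ∀ j : Nat, (∀ p k, k ≤ j → f p k = g p k) → (pvScanP f c0 j).2 = (pvScanP g c0 j).2 := by
  intro j
  induction j with
  | zero => intro _; rfl
  | succ j ih =>
    intro h
    show f (pvScanP f c0 j).2 (j + 1) = g (pvScanP g c0 j).2 (j + 1)
    rw [ih (fun p k hk => h p k (by omega)), h _ (j + 1) (le_refl _)]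

theorem pvNextRow_prefix (pA pB r : List Int) (m mA : Nat) (hm : 1 ≤ m) (hle : m ≤ mA)
    (hpp : ∀ t, t < m → pA.getD t 0 = pB.getD t 0) :
    ∀ t, t < m → (pvNextRow pA r mA).getD t 0 = (pvNextRow pB r m).getD t 0 := by
  intro t ht
  rw [pvNextRow, pvNextRow, pvScanP_getD_prefix _ _ (mA - 1) t (by omega),
    pvScanP_getD_prefix _ _ (m - 1) t (by omega), hpp 0 (by omega)]
  exact pvScanP_snd_congr _ _ _ t (fun p k hk => by rw [hpp k (by omega)])

theorem pvRow0_prefix (r : List Int) (m mA : Nat) (hm : 1 ≤ m) (hle : m ≤ mA) :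
    ∀ t, t < m → (pvRow0 r mA).getD t 0 = (pvRow0 r m).getD t 0 := by
  intro t ht
  rw [pvRow0, pvRow0, pvScanP_getD_prefix _ _ (mA - 1) t (by omega),
    pvScanP_getD_prefix _ _ (m - 1) t (by omega)]

theorem pvFold_prefix (m mA : Nat) (hm : 1 ≤ m) (hle : m ≤ mA) (zs : List (List Int)) :
    ∀ pA pB : List Int, (∀ t, t < m → pA.getD t 0 = pB.getD t 0) →
      ∀ t, t < m → (zs.foldl (fun p r => pvNextRow p r mA) pA).getD t 0
        = (zs.foldl (fun p r => pvNextRow p r m) pB).getD t 0 := by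
  induction zs with
  | nil => intro pA pB hpp; exact hpp
  | cons a zt ih =>
    intro pA pB hpp
    simp only [List.foldl_cons]
    exact ih _ _ (pvNextRow_prefix pA pB a m mA hm hle hpp)

theorem pvLastRow_prefix (z0 : List Int) (zs : List (List Int)) (m mA : Nat)
    (hm : 1 ≤ m) (hle : m ≤ mA) :
    ∀ t, t < m → (pvLastRow z0 zs mA).getD t 0 = (pvLastRow z0 zs m).getD t 0 :=
  pvFold_prefix m mA hm hle zs _ _ (pvRow0_prefix z0 m mA hm hle)

theorem pvSumaP_eq (zad : List (List Int)) (i : Int) :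
    pvSumaP zad i = (zad.map (fun row => PySem.List.pyGetD row i 0)).sum := by
  rw [pvSumaP, PySem.List.foldl_add zad (fun row => PySem.List.pyGetD row i 0) 0, zero_add]

theorem pvSumaMinP_eq (q0 : List Int) (qt : List (List Int)) (L : Nat) (hL : 2 ≤ L)
    (hq0 : q0.length = L) (t : Nat) (ht : t < L - 1) :
    pvSumaMinP (q0 :: qt) (t : Int)
      = (pvSuffSum ((PySem.List.pyRange 0 ((L - 1 : Nat) : Int) 1).map
          (fun k => (PySem.List.min? ((q0 :: qt).map (fun row => PySem.List.pyGetD row k 0)) (fun v => v)).getD 0))).getD (t + 1) 0 := by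
  set h := fun k => (PySem.List.min? ((q0 :: qt).map (fun row => PySem.List.pyGetD row k 0)) (fun v => v)).getD 0 with hh
  set mins := (PySem.List.pyRange 0 ((L - 1 : Nat) : Int) 1).map h with hmins
  have hmlen : mins.length = L - 1 := by
    simp [hmins, PySem.List.pyRange_one]
  rw [pvSumaMinP]
  simp only [PySem.List.pyGetD_zero, List.getD_cons_zero, hq0]
  have hbnd : ((L : Int)) - 1 = ((L - 1 : Nat) : Int) := by omega
  rw [hbnd]
  rw [PySem.List.foldl_add _ _ 0, zero_add]
  have hg : (fun k => ((q0 :: qt).foldl (fun (minP : Option Int) j =>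
      match minP with
      | none => some (PySem.List.pyGetD j k 0)
      | some v => if PySem.List.pyGetD j k 0 < v then some (PySem.List.pyGetD j k 0) else some v) none).getD 0) = h := by
    funext k
    rw [pvMinFold (fun j => PySem.List.pyGetD j k 0) (q0 :: qt) (by simp)]
    simp [hh]
  rw [hg]
  rw [pvSuffSum_getD mins (t + 1) (by omega)]
  have hdrop : mins.drop (t + 1) = (PySem.List.pyRange ((t + 1 : Nat) : Int) ((L - 1 : Nat) : Int) 1).map h := by
    rw [hmins, ← List.map_drop, pvRange_drop (t + 1) _ (by omega)]
  have hcast : ((t + 1 : Nat) : Int) = (t : Int) + 1 := by push_cast; ring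
  rw [hdrop, hcast]

theorem pvMain (pi zad zadania : List (List Int))
    (hpne : pi ≠ []) (hzne : zad ≠ []) (hqne : zadania ≠ [])
    (hL2 : 2 ≤ (zad.headD []).length)
    (hpw : (zad.headD []).length ≤ (pi.headD []).length ∧
      ∀ r ∈ pi, r.length = (pi.headD []).length)
    (hzw : ∀ r ∈ zad, (zad.headD []).length - 1 ≤ r.length)
    (hqw : (zad.headD []).length ≤ (zadania.headD []).length ∧
      ∀ r ∈ zadania, (zadania.headD []).length - 1 ≤ r.length) :
    Bound2 pi zad zadania = Bound2_alt pi zad zadania := by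
  obtain ⟨p0, pis, rfl⟩ := List.exists_cons_of_ne_nil hpne
  obtain ⟨z0, zt, rfl⟩ := List.exists_cons_of_ne_nil hzne
  obtain ⟨q0, qt, rfl⟩ := List.exists_cons_of_ne_nil hqne
  have hL2' : 2 ≤ z0.length := by simpa using hL2
  set L := z0.length with hLdef
  set m := L - 1 with hmdef
  have hm1 : 1 ≤ m := by omega
  set Lp := p0.length with hLpdef
  have hLLp : L ≤ Lp := by simpa using hpw.1
  set mA := Lp - 1 with hmAdef
  have hmmA : m ≤ mA := by omega
  have hpis : ∀ r ∈ pis, r.length = Lp := fun r hr => by simpa using hpw.2 r (by simp [hr])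
  set Lq := q0.length with hLqdef
  have hLLq : L ≤ Lq := by simpa using hqw.1
  set mz := Lq - 1 with hmzdef
  have hmmz : m ≤ mz := by omega
  set R := pvLastRow p0 pis m with hRdef
  have hRlen : R.length = m := pvLastRow_len _ _ _ hm1
  set RA := pvLastRow p0 pis mA with hRAdef
  set fcs := fun i => (((z0 :: zt).map (fun row => PySem.List.pyGetD row i 0)).sum : Int) with hfcs
  set hmin := fun k => ((PySem.List.min? ((q0 :: qt).map (fun row => PySem.List.pyGetD row k 0)) (fun v => v)).getD 0 : Int) with hhmin
  set mins := (PySem.List.pyRange 0 ((mz : Nat) : Int) 1).map hmin with hminsdef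
  have hminlen : mins.length = mz := by simp [hminsdef, PySem.List.pyRange_one]
  have e0z : PySem.List.pyGetD (z0 :: zt) (0 : Int) [] = z0 := by simp
  have e0p : PySem.List.pyGetD (p0 :: pis) (0 : Int) [] = p0 := by simp
  have e0q : PySem.List.pyGetD (q0 :: qt) (0 : Int) [] = q0 := by simp
  have hbz : ((z0.length : Int)) - 1 = ((m : Nat) : Int) := by omega
  have hbq : ((q0.length : Int)) - 1 = ((mz : Nat) : Int) := by omega
  -- A's C-row
  have hCrow : PySem.List.pyGetD (pvCalcC (p0 :: pis)) ((((p0 :: pis).length) : Int) - 1) [] = RA := by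
    have hx : (((p0 :: pis).length) : Int) - 1 = ((pis.length : Nat) : Int) := by simp
    have hlen : (((p0 :: pis).length) : Int) = ((pis.length : Nat) : Int) + 1 := by simp
    rw [hx, pvCalcC, hlen, PySem.List.pyGetD_natCast]
    have hout := pvCalcC_outer p0 pis Lp (by omega) rfl hpis pis.length (le_refl _)
    have h21 := hout.2.1
    rw [List.take_length] at h21
    rw [h21, hRAdef, hmAdef]
  -- A side normal form
  have hA : Bound2 (p0 :: pis) (z0 :: zt) (q0 :: qt)
      = (List.range m).foldl (fun b t =>
          if RA.getD t 0 + pvSumaP (z0 :: zt) (t : Int) + pvSumaMinP (q0 :: qt) (t : Int) > b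
          then RA.getD t 0 + pvSumaP (z0 :: zt) (t : Int) + pvSumaMinP (q0 :: qt) (t : Int) else b) 0 := by
    simp only [Bound2, hCrow, e0z, hbz]
    rw [PySem.List.pyRange_zero_natCast m, List.foldl_map]
    apply PySem.List.foldl_congr_mem
    intro b t ht
    rw [PySem.List.pyGetD_natCast]
  -- B side pieces
  have hslice0 : PySem.List.slice p0 none (some ((m : Nat) : Int)) = p0.take m := by
    rw [PySem.List.slice_to p0 (by omega)]
    simp
  have hcur0 : ((p0.take m).foldl (fun (p : List Int × Int) t => (p.1 ++ [p.2 + t], p.2 + t)) ([], 0)).1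
      = pvRow0 p0 m := by
    have : p0.take m = p0.take ((m - 1) + 1) := by congr 1; omega
    rw [this, pvB_row0 p0 (m - 1) (by omega)]
    rfl
  have hslice1 : PySem.List.slice (p0 :: pis) (some 1) none = pis := by
    rw [PySem.List.slice_from_one]
    rfl
  have hrows := pvB_rows m hm1 pis (pvRow0 p0 m) (pvRow0_len p0 m hm1)
    (fun r hr => by rw [hpis r hr]; omega)
  have hsuffeq : ((PySem.List.slice? (mins.reverse.foldl (fun r v => r ++ [v + PySem.List.pyGetD r (-1) 0]) [0]) none none (-1)).getD ([] : List Int))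
      = pvSuffSum mins := by
    rw [pvRsuff, PySem.List.slice?_none_none_neg_one]
    simp
  have hB : Bound2_alt (p0 :: pis) (z0 :: zt) (q0 :: qt)
      = (List.range m).foldl (fun b t =>
          if R.getD t 0 + fcs (t : Int) + (pvSuffSum mins).getD (t + 1) 0 > b
          then R.getD t 0 + fcs (t : Int) + (pvSuffSum mins).getD (t + 1) 0 else b) 0 := by
    simp only [Bound2_alt, e0z, e0p, e0q, hbz, hbq]
    rw [hslice0, hcur0, hslice1, hrows, hsuffeq]
    have hlr : List.foldl (fun p r => pvNextRow p r m) (pvRow0 p0 m) pis = R := by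
      rw [hRdef]; rfl
    rw [hlr]
    have htail : PySem.List.slice (pvSuffSum mins) (some 1) none = (pvSuffSum mins).tail :=
      PySem.List.slice_from_one _
    rw [htail]
    have hZ : R.zip (((PySem.List.pyRange 0 ((m : Nat) : Int) 1).map fcs).zip ((pvSuffSum mins).tail))
        = (List.range m).map (fun t => (R.getD t 0, fcs (t : Int), (pvSuffSum mins).getD (t + 1) 0)) := by
      apply List.ext_getElem
      · simp [hRlen, PySem.List.pyRange_one, pvSuffSum_len, hminlen]
        omega
      · intro t h1 h2
        have htm : t < m := by simpa using h2
        have hR1 : t < R.length := by omega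
        have hS1 : t + 1 < (pvSuffSum mins).length := by
          rw [pvSuffSum_len, hminlen]; omega
        simp only [List.getElem_zip, List.getElem_map, List.getElem_range, List.getElem_tail,
          PySem.List.getElem_pyRange_one]
        simp only [List.getD, List.getElem?_eq_getElem hR1, List.getElem?_eq_getElem hS1,
          Option.getD_some, zero_add]
    rw [hZ, List.foldl_map]
  rw [hA, hB]
  apply PySem.List.foldl_congr_mem
  intro b t ht
  have htm : t < m := by simpa using ht
  rw [pvLastRow_prefix p0 pis m mA hm1 hmmA t htm]
  rw [pvSumaP_eq, pvSumaMinP_eq q0 qt Lq (by omega) rfl t (by omega)]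

-- with no machines (zad's first row of width ≤ 1) both loops are empty and both ports return 0
theorem pvDegenerate (pi zad zadania : List (List Int))
    (h : (zad.headD []).length ≤ 1) :
    Bound2 pi zad zadania = Bound2_alt pi zad zadania := by
  have h0 : PySem.List.pyGetD zad (0 : Int) [] = zad.headD [] := by
    cases zad <;> simp [PySem.List.pyGetD, PySem.List.pyGet?, PySem.List.pyIdx?]
  have hnil : PySem.List.pyRange 0 (((zad.headD []).length : Int) - 1) 1 = [] :=
    PySem.List.pyRange_one_eq_nil (by omega)
  simp only [Bound2, Bound2_alt, h0, hnil]
  simp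

-- ===== VERDICT (by name: the statement is the Claim_ definition above) =====
theorem Bound2_spec : Claim_equal_Bound2 := by
  intro pi zad zadania _ hpre
  obtain ⟨h1, h2, h3, hrest⟩ := hpre
  rcases hrest with ⟨h4, h5, h6, h7⟩ | ⟨hdeg, -, -, -⟩
  · exact pvMain pi zad zadania h1 h2 h3 h4 h5 h6 h7
  · exact pvDegenerate pi zad zadania hdeg
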